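-- pv_equiv track=rewrite | github.com/ComeBackHomeRat/trabajo-programaci-n | gtablero.py | generartablero
-- ===== SOURCE A (Python) =====
-- def generartablero(n,m):
--     element = n*m
--     tablero = []
--     for e in range(n):
--         subt=[]
--         for i in range(m):
--             if e % 2 == 0:
--                 subt.append(element)
--
--             else:
--                 subt.insert(0,element)
--             element-=1
--         tablero.append(subt)
--     return tablero
-- ===== SOURCE B (Python) =====
-- def generartablero(n, m):
--     tablero = []
--     for e in range(n):
--         base = n * m - e * m
--         if e % 2 == 0:
--             tablero.append([base - j for j in range(m)])
--         else:
--             tablero.append([base - m + 1 + j for j in range(m)])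
--     return tablero
-- ===== Notes on version B (the rewrite author's own statement) =====
-- stated objective: faster
-- what changed: Replaces the running mutable counter and the append/insert(0) row mechanics with a closed-form value per cell: each row is a comprehension computed directly from the row index e and column index j.
import Mathlib
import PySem

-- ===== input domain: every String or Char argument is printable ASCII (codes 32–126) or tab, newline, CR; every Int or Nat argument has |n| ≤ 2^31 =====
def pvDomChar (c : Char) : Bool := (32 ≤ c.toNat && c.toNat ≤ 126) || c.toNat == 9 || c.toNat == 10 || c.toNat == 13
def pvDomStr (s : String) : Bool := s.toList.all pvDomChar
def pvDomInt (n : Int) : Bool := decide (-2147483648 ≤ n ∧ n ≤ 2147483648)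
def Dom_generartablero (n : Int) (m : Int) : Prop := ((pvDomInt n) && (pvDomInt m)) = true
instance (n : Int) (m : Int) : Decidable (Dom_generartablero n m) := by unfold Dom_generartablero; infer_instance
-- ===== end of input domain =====

-- B builds each row by a closed-form comprehension from the indices (e, j) instead of A's running counter with append/insert(0); simpler.

-- ===== PORT A =====
-- inner loop body of A: subt.append(element) / subt.insert(0, element); element -= 1
def generartableroInner (e : Int) (st : Int × List Int) (_i : Int) : Int × List Int :=
  let subt := if PySem.Int.mod e 2 = 0 then st.2 ++ [st.1] else st.1 :: st.2
  (st.1 - 1, subt)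

def generartablero (n : Int) (m : Int) : List (List Int) :=
  let st := (PySem.List.pyRange 0 n 1).foldl (fun (st : Int × List (List Int)) e =>
    let inner := (PySem.List.pyRange 0 m 1).foldl (generartableroInner e) (st.1, [])
    (inner.1, st.2 ++ [inner.2])) (n * m, [])
  st.2

-- ===== PORT B =====
def generartablero_alt (n : Int) (m : Int) : List (List Int) :=
  (PySem.List.pyRange 0 n 1).foldl (fun tablero e =>
    let base := n * m - e * m
    tablero ++ [if PySem.Int.mod e 2 = 0
      then (PySem.List.pyRange 0 m 1).map (fun j => base - j)
      else (PySem.List.pyRange 0 m 1).map (fun j => base - m + 1 + j)]) []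

-- ===== PRECONDITION & SPEC =====
def Spec_generartablero (n : Int) (m : Int) (out : List (List Int)) : Prop := out = generartablero_alt n m
instance (n : Int) (m : Int) (out : List (List Int)) : Decidable (Spec_generartablero n m out) := by unfold Spec_generartablero; infer_instance

-- ===== CLAIM (what is proved, stated in full; the proofs are below) =====
def Claim_equal_generartablero : Prop := ∀ (n : Int) (m : Int), Dom_generartablero n m → Spec_generartablero n m (generartablero n m)

-- ===== LEMMAS AND PROOFS =====

-- A's inner loop over any index list: the counter drops by the length, and the row
-- is the descending run from the starting counter (reversed on odd rows).
theorem innerRun (e : Int) :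
    ∀ (L : List Int) (el : Int) (s : List Int),
      L.foldl (generartableroInner e) (el, s) =
        (el - L.length,
         if PySem.Int.mod e 2 = 0
           then s ++ (List.range L.length).map (fun k : Nat => el - (k : Int))
           else ((List.range L.length).map (fun k : Nat => el - (k : Int))).reverse ++ s) := by
  intro L
  induction L with
  | nil => intro el s; simp
  | cons x L ih =>
    intro el s
    rw [List.foldl_cons]
    simp only [generartableroInner]
    rw [ih]
    simp only [List.length_cons]
    have hdesc : (List.range (L.length + 1)).map (fun k : Nat => el - (k : Int))
        = el :: (List.range L.length).map (fun k : Nat => el - 1 - (k : Int)) := by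
      rw [List.range_succ_eq_map, List.map_cons, List.map_map]
      refine congrArg₂ List.cons (by norm_num) ?_
      refine List.map_congr_left (fun k _ => ?_)
      simp [Function.comp]; ring
    rw [hdesc]
    split_ifs with h
    · refine congrArg₂ Prod.mk (by push_cast; ring) (by simp)
    · refine congrArg₂ Prod.mk (by push_cast; ring) (by simp)

-- reversing a descending run gives the ascending run
theorem rev_desc_row (el : Int) (M : Nat) :
    ((List.range M).map (fun k : Nat => el - (k : Int))).reverse =
      (List.range M).map (fun k : Nat => el - M + 1 + (k : Int)) := by
  apply List.ext_getElem
  · simp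
  · intro i h1 h2
    simp only [List.length_reverse, List.length_map, List.length_range] at h1 h2
    rw [List.getElem_reverse]
    simp only [List.getElem_map, List.getElem_range, List.length_map, List.length_range]
    have : (↑(M - 1 - i) : Int) = (M : Int) - 1 - i := by omega
    rw [this]; ring

-- B's row for row index e
def rowB (n m e : Int) : List Int :=
  if PySem.Int.mod e 2 = 0
    then (PySem.List.pyRange 0 m 1).map (fun j => n * m - e * m - j)
    else (PySem.List.pyRange 0 m 1).map (fun j => n * m - e * m - m + 1 + j)

theorem pyRange0_map (m : Int) (f : Int → Int) :
    (PySem.List.pyRange 0 m 1).map f = (List.range m.toNat).map (fun k : Nat => f (k : Int)) := by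
  rw [PySem.List.pyRange_one, List.map_map]
  rw [show ((m : Int) - 0).toNat = m.toNat by simp]
  exact List.map_congr_left (fun k _ => by simp [Function.comp])

theorem altEqMap (n m : Int) :
    generartablero_alt n m = (PySem.List.pyRange 0 n 1).map (rowB n m) := by
  unfold generartablero_alt rowB
  rw [PySem.List.foldl_append_singleton_eq_map]
  simp

-- A's inner result at row e, when the counter equals n*m - e*m, is exactly B's row.
theorem rowAgree (n m e : Int) :
    ((PySem.List.pyRange 0 m 1).foldl (generartableroInner e) (n * m - e * m, [])).2
      = rowB n m e := by
  rw [innerRun]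
  unfold rowB
  have hlen : (PySem.List.pyRange 0 m 1).length = m.toNat := by
    rw [PySem.List.length_pyRange_one]; simp
  rw [hlen, pyRange0_map, pyRange0_map]
  dsimp only
  split_ifs with h
  · simp
  · rw [rev_desc_row, List.append_nil]
    refine List.map_congr_left (fun k hk => ?_)
    rcases le_or_gt m 0 with hm | hm
    · have hz : m.toNat = 0 := by omega
      rw [hz] at hk; simp at hk
    · have hc : ((m.toNat : Nat) : Int) = m := by omega
      rw [hc]

-- generic: appending a constant empty row per step
theorem constRows :
    ∀ (L : List Int) (c : Int) (tab : List (List Int)),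
      L.foldl (fun (st : Int × List (List Int)) _ => (st.1, st.2 ++ [([] : List Int)])) (c, tab)
        = (c, tab ++ L.map (fun _ => ([] : List Int))) := by
  intro L
  induction L with
  | nil => intro c tab; simp
  | cons x L ih => intro c tab; rw [List.foldl_cons, ih]; simp

-- A's outer loop for 0 < m, generalized over the remaining rows
theorem outerRun (n m : Int) (hm : 0 < m) :
    ∀ (M : Nat) (a : Int) (tab : List (List Int)), a + M = n →
      (PySem.List.pyRange a n 1).foldl (fun (st : Int × List (List Int)) e =>
          let inner := (PySem.List.pyRange 0 m 1).foldl (generartableroInner e) (st.1, [])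
          (inner.1, st.2 ++ [inner.2])) (n * m - a * m, tab)
        = (n * m - a * m - M * m, tab ++ (PySem.List.pyRange a n 1).map (rowB n m)) := by
  intro M
  induction M with
  | zero =>
    intro a tab ha
    have hnil : PySem.List.pyRange a n 1 = [] := PySem.List.pyRange_one_eq_nil (by omega)
    rw [hnil]; simp
  | succ M ih =>
    intro a tab ha
    have hsplit : PySem.List.pyRange a n 1 = a :: PySem.List.pyRange (a + 1) n 1 :=
      PySem.List.pyRange_one_cons (by omega)
    rw [hsplit, List.foldl_cons, List.map_cons]
    dsimp only
    have h1 : ((PySem.List.pyRange 0 m 1).foldl (generartableroInner a) (n * m - a * m, [])).1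
        = n * m - (a + 1) * m := by
      rw [innerRun]
      have hlen : ((PySem.List.pyRange 0 m 1).length : Int) = m := by
        rw [PySem.List.length_pyRange_one]; omega
      dsimp only
      rw [hlen]; ring
    rw [rowAgree, h1, ih (a + 1) (tab ++ [rowB n m a]) (by push_cast at ha ⊢; omega)]
    refine congrArg₂ Prod.mk (by push_cast; ring) (by simp)

-- ===== VERDICT (by name: the statement is the Claim_ definition above) =====
theorem generartablero_spec : Claim_equal_generartablero := by
  intro n m _
  unfold Spec_generartablero generartablero
  rw [altEqMap]
  dsimp only
  rcases le_or_gt n 0 with hn | hn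
  · rw [show PySem.List.pyRange 0 n 1 = [] from PySem.List.pyRange_one_eq_nil (by omega)]
    simp
  · rcases le_or_gt m 0 with hm | hm
    · have hempty : PySem.List.pyRange 0 m 1 = [] := PySem.List.pyRange_one_eq_nil (by omega)
      simp only [hempty, List.foldl_nil]
      rw [constRows]
      refine Eq.trans rfl ?_
      rw [List.nil_append]
      refine List.map_congr_left (fun e _ => ?_)
      simp [rowB, hempty]
    · have h0 : (n * m, ([] : List (List Int))) = (n * m - 0 * m, ([] : List (List Int))) := by
        norm_num
      rw [h0, outerRun n m hm n.toNat 0 [] (by omega)]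
      simp
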